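-- pv_equiv track=rewrite | github.com/cxfyxl/xformparser | tools/huggingface2onnx.py | build_relation
-- ===== SOURCE A (Python) =====
-- def build_relation(labels):
--     # new_relations = []
--
--         # all_possible_relations = set([(0,1)])
--     all_possible_relations = set(
--         [
--             (i, j)
--             for i in range(len(labels))
--             for j in range(len(labels))
--             # if i != j
--             if labels[i] == 1 and (labels[j] == 2 or labels[j] == 4) # or entities[b]["label"][j] == 4
--             and (j - i) <= 50
--             and (j - i) >= 0
--         ]
--     )
--     reordered_relations = sorted(list(all_possible_relations))
--
--     relation_per_doc = {"head": [], "tail": [], "label": []}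
--     relation_per_doc["head"] = [i[0] for i in reordered_relations]
--     relation_per_doc["tail"] = [i[1] for i in reordered_relations]
--     relation_per_doc["label"] = [1] * len(reordered_relations)
--     # assert len(relation_per_doc["head"]) != 0
--     # new_relations.append(relation_per_doc)
--     return relation_per_doc, [i[0]*len(labels)+i[1] for i in reordered_relations]
-- ===== SOURCE B (Python) =====
-- def build_relation(labels):
--     n = len(labels)
--     heads = []
--     tails = []
--     codes = []
--     for i, v in enumerate(labels):
--         if v == 1:
--             hi = min(i + 51, n)
--             for j in range(i, hi):
--                 if labels[j] == 2 or labels[j] == 4: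
--                     heads.append(i)
--                     tails.append(j)
--                     codes.append(i * n + j)
--     return {"head": heads, "tail": tails, "label": [1] * len(heads)}, codes
-- ===== Notes on version B (the rewrite author's own statement) =====
-- stated objective: faster
-- what changed: A enumerates all n^2 (i,j) pairs, dedups them through a set and sorts; B makes one pass over the labels and, for each head i with label 1, scans only the window j in [i, min(i+51, n)), emitting the three result lists directly in already-sorted order with no set and no sort.
import Mathlib
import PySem

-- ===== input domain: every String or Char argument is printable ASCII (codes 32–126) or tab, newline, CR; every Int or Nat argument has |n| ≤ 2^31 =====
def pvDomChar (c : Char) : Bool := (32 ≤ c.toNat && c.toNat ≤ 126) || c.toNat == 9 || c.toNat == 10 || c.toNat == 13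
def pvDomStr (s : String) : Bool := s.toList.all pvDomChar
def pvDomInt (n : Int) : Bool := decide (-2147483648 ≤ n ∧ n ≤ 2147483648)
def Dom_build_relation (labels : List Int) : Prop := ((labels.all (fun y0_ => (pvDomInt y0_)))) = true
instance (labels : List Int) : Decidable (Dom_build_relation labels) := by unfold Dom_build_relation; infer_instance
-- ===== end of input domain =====

-- B replaces A's O(n^2) scan of all (i,j) pairs followed by set+sort with a single pass that,
-- for each head i with label 1, scans only the window j ∈ [i, min(i+51, n)) — objective: faster (asymptotic).


-- ===== PORT A =====
def build_relation (labels : List Int) : (List (String × List Int)) × List Int :=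
  let n : Int := PySem.List.len labels
  let all_possible_relations : PySem.Set (Int × Int) := PySem.Set.ofList
    ((PySem.List.pyRange 0 n 1).flatMap (fun i =>
      (PySem.List.pyRange 0 n 1).filterMap (fun j =>
        if (PySem.List.pyGetD labels i 0 == 1
            && (PySem.List.pyGetD labels j 0 == 2 || PySem.List.pyGetD labels j 0 == 4)
            && decide (j - i ≤ 50) && decide (0 ≤ j - i)) then some (i, j) else none)))
  let reordered_relations := PySem.List.sorted2 all_possible_relations (fun p => p.1) (fun p => p.2)
  let d := ((PySem.Dict.empty.insert "head" ([] : List Int)).insert "tail" []).insert "label" []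
  let d := d.insert "head" (reordered_relations.map (fun p => p.1))
  let d := d.insert "tail" (reordered_relations.map (fun p => p.2))
  let d := d.insert "label" (PySem.List.pyRepeat [(1 : Int)] (PySem.List.len reordered_relations))
  (d.items, reordered_relations.map (fun p => p.1 * n + p.2))

-- ===== PORT B =====
def build_relation_alt (labels : List Int) : (List (String × List Int)) × List Int :=
  let n : Int := PySem.List.len labels
  let res := (PySem.List.enumerate labels).foldl
    (fun (acc : List Int × List Int × List Int) iv =>
      if iv.2 == 1 then
        (PySem.List.pyRange iv.1 (min (iv.1 + 51) n) 1).foldl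
          (fun acc2 j =>
            if PySem.List.pyGetD labels j 0 == 2 || PySem.List.pyGetD labels j 0 == 4 then
              (acc2.1 ++ [iv.1], acc2.2.1 ++ [j], acc2.2.2 ++ [iv.1 * n + j])
            else acc2) acc
      else acc)
    ([], [], [])
  ([("head", res.1), ("tail", res.2.1), ("label", PySem.List.pyRepeat [(1 : Int)] (PySem.List.len res.1))], res.2.2)

-- ===== PRECONDITION & SPEC =====
def Spec_build_relation (labels : List Int) (out : (List (String × List Int)) × List Int) : Prop := out = build_relation_alt labels
instance (labels : List Int) (out : (List (String × List Int)) × List Int) : Decidable (Spec_build_relation labels out) := by unfold Spec_build_relation; infer_instance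

-- ===== CLAIM (what is proved, stated in full; the proofs are below) =====
def Claim_equal_build_relation : Prop := ∀ (labels : List Int), Dom_build_relation labels → Spec_build_relation labels (build_relation labels)

-- ===== LEMMAS AND PROOFS =====

-- the tail test labels[j] ∈ {2, 4}
def pvTailOK (labels : List Int) (j : Int) : Bool :=
  PySem.List.pyGetD labels j 0 == 2 || PySem.List.pyGetD labels j 0 == 4

-- per-head window of accepted tails
def pvGrp (labels : List Int) (i : Int) : List Int :=
  if PySem.List.pyGetD labels i 0 == 1 then
    (PySem.List.pyRange i (min (i + 51) (PySem.List.len labels)) 1).filter (pvTailOK labels)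
  else []

-- the canonical (head, tail) pair list, in generation order
def pvL (labels : List Int) : List (Int × Int) :=
  (PySem.List.pyRange 0 (PySem.List.len labels) 1).flatMap
    (fun i => (pvGrp labels i).map (fun j => (i, j)))

lemma pvFilterMap_if (js : List Int) (c : Int → Bool) (i : Int) :
    js.filterMap (fun j => if c j then some (i, j) else none)
      = (js.filter c).map (fun j => (i, j)) := by
  induction js with
  | nil => rfl
  | cons j t ih => by_cases h : c j <;> simp [h, ih]

lemma pvA_pairs (labels : List Int) :
    (PySem.List.pyRange 0 (PySem.List.len labels) 1).flatMap (fun i =>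
      (PySem.List.pyRange 0 (PySem.List.len labels) 1).filterMap (fun j =>
        if (PySem.List.pyGetD labels i 0 == 1
            && (PySem.List.pyGetD labels j 0 == 2 || PySem.List.pyGetD labels j 0 == 4)
            && decide (j - i ≤ 50) && decide (0 ≤ j - i)) then some (i, j) else none))
      = pvL labels := by
  unfold pvL
  apply List.flatMap_congr
  intro i hi
  rw [pvFilterMap_if]
  rcases (PySem.List.mem_pyRange_one).1 hi with ⟨h0i, hin⟩
  congr 1
  unfold pvGrp
  by_cases hh : PySem.List.pyGetD labels i 0 == 1
  · simp only [hh, if_true, Bool.true_and]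
    have him : i ≤ min (i + 51) (PySem.List.len labels) := le_min (by omega) (le_of_lt hin)
    have hmn : min (i + 51) (PySem.List.len labels) ≤ PySem.List.len labels := min_le_right _ _
    rw [PySem.List.pyRange_one_append 0 i (PySem.List.len labels) h0i (le_of_lt hin),
        PySem.List.pyRange_one_append i (min (i + 51) (PySem.List.len labels))
          (PySem.List.len labels) him hmn]
    rw [List.filter_append, List.filter_append]
    have hleft : (PySem.List.pyRange 0 i 1).filter
        (fun j => (PySem.List.pyGetD labels j 0 == 2 || PySem.List.pyGetD labels j 0 == 4)
          && decide (j - i ≤ 50) && decide (0 ≤ j - i)) = [] := by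
      rw [List.filter_eq_nil_iff]
      intro j hj
      rcases (PySem.List.mem_pyRange_one).1 hj with ⟨_, hji⟩
      simp only [Bool.and_eq_true, decide_eq_true_eq]
      omega
    have hright : (PySem.List.pyRange (min (i + 51) (PySem.List.len labels))
          (PySem.List.len labels) 1).filter
        (fun j => (PySem.List.pyGetD labels j 0 == 2 || PySem.List.pyGetD labels j 0 == 4)
          && decide (j - i ≤ 50) && decide (0 ≤ j - i)) = [] := by
      rw [List.filter_eq_nil_iff]
      intro j hj
      rcases (PySem.List.mem_pyRange_one).1 hj with ⟨hmj, hjn⟩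
      simp only [Bool.and_eq_true, decide_eq_true_eq]
      omega
    rw [hleft, hright, List.nil_append, List.append_nil]
    apply List.filter_congr
    intro j hj
    rcases (PySem.List.mem_pyRange_one).1 hj with ⟨hij, hjm⟩
    unfold pvTailOK
    have h50 : decide (j - i ≤ 50) = true := by simp; omega
    have h0 : decide (0 ≤ j - i) = true := by simp; omega
    rw [h50, h0]
    simp
  · simp only [Bool.not_eq_true] at hh
    simp [hh]

lemma pvPairwise_flatMap {α β : Type} (l : List α) (f : α → List β) (R : β → β → Prop)
    (h1 : l.Pairwise (fun a b => ∀ x ∈ f a, ∀ y ∈ f b, R x y))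
    (h2 : ∀ a ∈ l, (f a).Pairwise R) : (l.flatMap f).Pairwise R := by
  induction l with
  | nil => simp
  | cons a t ih =>
    rw [List.flatMap_cons, List.pairwise_append]
    refine ⟨h2 a (by simp), ih h1.of_cons (fun b hb => h2 b (by simp [hb])), ?_⟩
    intro x hx y hy
    rcases List.mem_flatMap.1 hy with ⟨b, hb, hyb⟩
    exact (List.pairwise_cons.1 h1).1 b hb x hx y hyb

lemma pvGrp_pairwise (labels : List Int) (i : Int) : (pvGrp labels i).Pairwise (· < ·) := by
  unfold pvGrp
  split
  · exact (PySem.List.pairwise_lt_pyRange_one _ _).filter _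
  · exact List.Pairwise.nil

lemma pvL_pairwise (labels : List Int) :
    (pvL labels).Pairwise (fun a b => a.1 < b.1 ∨ (a.1 = b.1 ∧ a.2 < b.2)) := by
  unfold pvL
  apply pvPairwise_flatMap
  · apply (PySem.List.pairwise_lt_pyRange_one _ _).imp_of_mem
    intro a b _ _ hab x hx y hy
    rcases List.mem_map.1 hx with ⟨j, _, rfl⟩
    rcases List.mem_map.1 hy with ⟨k, _, rfl⟩
    exact Or.inl hab
  · intro i _
    exact (pvGrp_pairwise labels i).map _ (fun {a b} h => Or.inr ⟨rfl, h⟩)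

lemma pvFoldl_insertBy_eq_append {α : Type} (before : α → α → Bool) (xs : List α) :
    ∀ acc : List α, (∀ x ∈ xs, ∀ y ∈ acc, before x y = false) →
    xs.Pairwise (fun a b => before b a = false) →
    xs.foldl (fun acc x => PySem.List.insertBy before x acc) acc = acc ++ xs := by
  induction xs with
  | nil => intro acc _ _; simp
  | cons x t ih =>
    intro acc h1 h2
    simp only [List.foldl_cons]
    rw [PySem.List.insertBy_of_forall_not_before before x acc (h1 x (by simp))]
    rw [ih (acc ++ [x]) ?_ h2.of_cons]
    · simp
    · intro z hz y hy
      rcases List.mem_append.1 hy with hy | hy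
      · exact h1 z (by simp [hz]) y hy
      · simp at hy; subst hy
        exact (List.pairwise_cons.1 h2).1 z hz

lemma pvSorted2_eq_self (labels : List Int) :
    PySem.List.sorted2 (pvL labels) (fun p => p.1) (fun p => p.2) = pvL labels := by
  show (pvL labels).foldl (fun acc x => PySem.List.insertBy _ x acc) [] = pvL labels
  rw [pvFoldl_insertBy_eq_append _ _ [] (by simp)]
  · simp
  · apply (pvL_pairwise labels).imp_of_mem
    intro a b _ _ hab
    rcases hab with h | ⟨h1, h2⟩ <;> simp <;> omega

lemma pvInnerFold (labels : List Int) (i : Int) (js : List Int) :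
    ∀ acc : List Int × List Int × List Int,
    js.foldl (fun acc2 j =>
        if PySem.List.pyGetD labels j 0 == 2 || PySem.List.pyGetD labels j 0 == 4 then
          (acc2.1 ++ [i], acc2.2.1 ++ [j], acc2.2.2 ++ [i * (PySem.List.len labels) + j])
        else acc2) acc
      = (acc.1 ++ (js.filter (pvTailOK labels)).map (fun _ => i),
         acc.2.1 ++ js.filter (pvTailOK labels),
         acc.2.2 ++ (js.filter (pvTailOK labels)).map (fun j => i * (PySem.List.len labels) + j)) := by
  induction js with
  | nil => intro acc; simp
  | cons j t ih =>
    intro acc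
    by_cases h : pvTailOK labels j
    · unfold pvTailOK at h
      simp only [List.foldl_cons, h, if_true, ih, List.filter_cons, pvTailOK]
      simp
    · unfold pvTailOK at h
      rw [Bool.not_eq_true] at h
      simp only [List.foldl_cons, h, ih, List.filter_cons, pvTailOK]
      simp

lemma pvOuterFold (labels : List Int) (is : List Int) :
    ∀ acc : List Int × List Int × List Int,
    is.foldl (fun acc i =>
        if PySem.List.pyGetD labels i 0 == 1 then
          (PySem.List.pyRange i (min (i + 51) (PySem.List.len labels)) 1).foldl
            (fun acc2 j =>
              if PySem.List.pyGetD labels j 0 == 2 || PySem.List.pyGetD labels j 0 == 4 then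
                (acc2.1 ++ [i], acc2.2.1 ++ [j], acc2.2.2 ++ [i * (PySem.List.len labels) + j])
              else acc2) acc
        else acc) acc
      = (acc.1 ++ (is.flatMap (fun i => (pvGrp labels i).map (fun j => (i, j)))).map (fun p => p.1),
         acc.2.1 ++ (is.flatMap (fun i => (pvGrp labels i).map (fun j => (i, j)))).map (fun p => p.2),
         acc.2.2 ++ (is.flatMap (fun i => (pvGrp labels i).map (fun j => (i, j)))).map
           (fun p => p.1 * (PySem.List.len labels) + p.2)) := by
  induction is with
  | nil => intro acc; simp
  | cons i t ih =>
    intro acc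
    simp only [List.foldl_cons, List.flatMap_cons, List.map_append]
    by_cases h : PySem.List.pyGetD labels i 0 == 1
    · rw [if_pos h, pvInnerFold labels i, ih]
      unfold pvGrp
      rw [if_pos h]
      simp [Function.comp_def]
    · rw [Bool.not_eq_true] at h
      rw [if_neg (by simp [h]), ih]
      unfold pvGrp
      rw [if_neg (by simp [h])]
      simp

lemma pvB_fold (labels : List Int) :
    build_relation_alt labels =
      ([("head", (pvL labels).map (fun p => p.1)),
        ("tail", (pvL labels).map (fun p => p.2)),
        ("label", PySem.List.pyRepeat [(1 : Int)] (PySem.List.len ((pvL labels).map (fun p => p.1))))],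
       (pvL labels).map (fun p => p.1 * (PySem.List.len labels) + p.2)) := by
  unfold build_relation_alt
  dsimp only
  rw [PySem.List.enumerate_eq_map_pyRange labels 0, List.foldl_map]
  rw [pvOuterFold labels (PySem.List.pyRange 0 (PySem.List.len labels) 1) ([], [], [])]
  simp [pvL]

-- ===== VERDICT (by name: the statement is the Claim_ definition above) =====
theorem build_relation_spec : Claim_equal_build_relation := by
  intro labels _
  unfold Spec_build_relation
  rw [pvB_fold]
  unfold build_relation
  dsimp only
  have hnodup : (pvL labels).Nodup := by
    apply (pvL_pairwise labels).imp
    intro a b hab heq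
    rcases hab with h | ⟨h1, h2⟩ <;> rw [heq] at * <;> omega
  rw [pvA_pairs, PySem.Set.ofList_eq_self_of_nodup _ hnodup, pvSorted2_eq_self]
  simp [PySem.Dict.empty, PySem.Dict.insert, PySem.List.len]
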